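-- pv_equiv track=rewrite | github.com/rtmendes/justhtml | src/justhtml/sanitize.py | _get_scheme
-- ===== SOURCE A (Python) =====
-- def _is_valid_scheme(scheme: str) -> bool:
--     first = scheme[0]
--     if not ("a" <= first <= "z" or "A" <= first <= "Z"):
--         return False
--     for ch in scheme[1:]:
--         if "a" <= ch <= "z" or "A" <= ch <= "Z" or "0" <= ch <= "9" or ch in "+-.":
--             continue
--         return False
--     return True
--
-- def _get_scheme(value: str) -> str | None:
--     """Return the URL scheme (lowercased) if present and valid, else None."""
--     idx = value.find(":")
--     if idx <= 0:
--         return None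
--     # Scheme must appear before any path/query/fragment separator.
--     end = len(value)
--     for sep in ("/", "?", "#"):
--         j = value.find(sep)
--         if j != -1 and j < end:
--             end = j
--     if idx >= end:
--         return None
--     scheme = value[:idx]
--     if not _is_valid_scheme(scheme):
--         return None
--     return scheme.lower()
-- ===== SOURCE B (Python) =====
-- def _get_scheme(value: str) -> str | None:
--     """Return the URL scheme (lowercased) if present and valid, else None.
--
--     Single left-to-right scan: the first character must be a letter, then
--     scheme characters are collected until the first ':' (success) or any
--     other character (failure).  No find() passes over the whole string.
--     """
--     if not value:
--         return None
--     c0 = value[0]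
--     if not ("a" <= c0 <= "z" or "A" <= c0 <= "Z"):
--         return None
--     buf = [c0]
--     for ch in value[1:]:
--         if ch == ":":
--             return "".join(buf).lower()
--         if ("a" <= ch <= "z" or "A" <= ch <= "Z"
--                 or "0" <= ch <= "9" or ch in "+-."):
--             buf.append(ch)
--         else:
--             return None
--     return None
-- ===== Notes on version B (the rewrite author's own statement) =====
-- stated objective: alternative
-- what changed: Replaces A's four separate find() scans plus a separate validation pass over the extracted prefix with one single left-to-right scan that validates characters as it goes and stops at the first colon or invalid character.
import Mathlib
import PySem

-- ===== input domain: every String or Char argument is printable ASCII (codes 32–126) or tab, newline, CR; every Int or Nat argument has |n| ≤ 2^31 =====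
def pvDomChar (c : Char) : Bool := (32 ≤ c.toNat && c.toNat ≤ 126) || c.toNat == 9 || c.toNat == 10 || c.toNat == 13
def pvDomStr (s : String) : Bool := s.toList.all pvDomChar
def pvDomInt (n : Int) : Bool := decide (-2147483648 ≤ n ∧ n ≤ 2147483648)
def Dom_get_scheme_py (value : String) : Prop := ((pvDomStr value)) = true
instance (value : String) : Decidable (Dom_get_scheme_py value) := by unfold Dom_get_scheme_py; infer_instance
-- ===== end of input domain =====

-- B replaces A's four find() scans plus a separate validation pass with one
-- left-to-right scan that validates while searching for the first colon
-- (alternative decomposition, same asymptotic cost).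


-- ===== PORT A =====
-- helper `_is_valid_scheme`; `scheme[0]` would raise IndexError on "", the caller
-- only passes nonempty strings, so the `none` of pyGet? maps to `false` (unreachable).
def is_valid_scheme_py (scheme : String) : Bool :=
  match PySem.Str.pyGet? scheme 0 with
  | none => false
  | some first =>
    if !(decide ('a' ≤ first ∧ first ≤ 'z') || decide ('A' ≤ first ∧ first ≤ 'Z')) then false
    else
      -- `for ch in scheme[1:]` with an early `return False` = all chars pass
      (PySem.Str.slice scheme (some 1) none).toList.all (fun ch =>
        decide ('a' ≤ ch ∧ ch ≤ 'z') || decide ('A' ≤ ch ∧ ch ≤ 'Z') ||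
        decide ('0' ≤ ch ∧ ch ≤ '9') || ch == '+' || ch == '-' || ch == '.')

def get_scheme_py (value : String) : Option String :=
  let idx := PySem.Str.find value ":"
  if idx ≤ 0 then none
  else
    let end0 := PySem.Str.len value
    let end1 := let j := PySem.Str.find value "/"; if j ≠ -1 ∧ j < end0 then j else end0
    let end2 := let j := PySem.Str.find value "?"; if j ≠ -1 ∧ j < end1 then j else end1
    let end3 := let j := PySem.Str.find value "#"; if j ≠ -1 ∧ j < end2 then j else end2
    if idx ≥ end3 then none
    else
      let scheme := PySem.Str.slice value none (some idx)
      if is_valid_scheme_py scheme then some (PySem.Str.lower scheme) else none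

-- ===== PORT B =====
def schemeTailB (ch : Char) : Bool :=
  decide ('a' ≤ ch ∧ ch ≤ 'z') || decide ('A' ≤ ch ∧ ch ≤ 'Z') ||
  decide ('0' ≤ ch ∧ ch ≤ '9') || ch == '+' || ch == '-' || ch == '.'

-- the `for ch in value[1:]` loop of B, carrying the accumulated `buf`
def scanB : List Char → List Char → Option (List Char)
  | [], _ => none
  | ch :: rest, buf =>
    if ch == ':' then some buf
    else if schemeTailB ch then scanB rest (buf ++ [ch])
    else none

def get_scheme_py_alt (value : String) : Option String :=
  match value.toList with
  | [] => none
  | c0 :: rest =>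
    if decide ('a' ≤ c0 ∧ c0 ≤ 'z') || decide ('A' ≤ c0 ∧ c0 ≤ 'Z') then
      match scanB rest [c0] with
      | some buf => some (PySem.Str.lower (String.ofList buf))
      | none => none
    else none

-- ===== PRECONDITION & SPEC =====
def Spec_get_scheme_py (value : String) (out : Option String) : Prop := out = get_scheme_py_alt value
instance (value : String) (out : Option String) : Decidable (Spec_get_scheme_py value out) := by unfold Spec_get_scheme_py; infer_instance

-- ===== CLAIM (what is proved, stated in full; the proofs are below) =====
def Claim_equal_get_scheme_py : Prop := ∀ (value : String), Dom_get_scheme_py value → Spec_get_scheme_py value (get_scheme_py value)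


-- ===== LEMMAS AND PROOFS =====

-- [x] is a prefix exactly when x is the head
theorem singleton_prefix_iff (x : Char) (l : List Char) : [x] <+: l ↔ l.head? = some x := by
  cases l <;> simp [List.prefix_cons_iff, eq_comm]

theorem singleton_prefix_drop_iff (l : List Char) (j : Nat) (x : Char) :
    [x] <+: l.drop j ↔ l[j]? = some x := by
  rw [singleton_prefix_iff, List.head?_drop]

theorem mem_take_of_getElem? (l : List Char) (i k : Nat) (x : Char)
    (h : l[i]? = some x) (hik : i < k) : x ∈ l.take k := by
  exact List.mem_of_getElem? ((List.getElem?_take_of_lt hik).symm ▸ h)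

-- first-occurrence characterisation of Python's str.find for a single character
theorem find_at (cs : List Char) (x : Char) (k : Nat)
    (h1 : x ∉ cs.take k) (h2 : cs[k]? = some x) :
    PySem.Chars.find cs [x] = (k : Int) := by
  have hmem : x ∈ cs := List.mem_of_getElem? h2
  have hnn : 0 ≤ PySem.Chars.find cs [x] := by
    rw [PySem.Chars.find_nonneg_iff, List.singleton_infix_iff]; exact hmem
  obtain ⟨hpre, hmin⟩ := PySem.Chars.find_spec hnn
  rw [singleton_prefix_drop_iff] at hpre
  set t := (PySem.Chars.find cs [x]).toNat with ht
  have hk : t = k := by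
    rcases Nat.lt_trichotomy t k with h | h | h
    · exact absurd (mem_take_of_getElem? cs t k x hpre h) h1
    · exact h
    · exact absurd ((singleton_prefix_drop_iff cs k x).mpr h2) (hmin k h)
  omega

theorem find_none_of_not_mem (cs : List Char) (x : Char) (h : x ∉ cs) :
    PySem.Chars.find cs [x] = -1 := by
  rw [PySem.Chars.find_eq_neg_one_iff]
  simp [List.singleton_infix_iff, h]

theorem find_lb (cs : List Char) (x : Char) (k : Nat) (h1 : x ∉ cs.take k) :
    PySem.Chars.find cs [x] = -1 ∨ (k : Int) ≤ PySem.Chars.find cs [x] := by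
  by_cases hmem : x ∈ cs
  · right
    have hnn : 0 ≤ PySem.Chars.find cs [x] := by
      rw [PySem.Chars.find_nonneg_iff, List.singleton_infix_iff]; exact hmem
    obtain ⟨hpre, _⟩ := PySem.Chars.find_spec hnn
    rw [singleton_prefix_drop_iff] at hpre
    by_contra hlt
    have : (PySem.Chars.find cs [x]).toNat < k := by omega
    exact h1 (mem_take_of_getElem? cs _ k x hpre this)
  · exact Or.inl (find_none_of_not_mem cs x hmem)

-- characters of the scheme class are not ':' '/' '?' '#'
theorem tail_not_special (c : Char) (h : schemeTailB c = true) :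
    c ≠ ':' ∧ c ≠ '/' ∧ c ≠ '?' ∧ c ≠ '#' := by
  refine ⟨?_, ?_, ?_, ?_⟩ <;> rintro rfl <;> exact absurd h (by decide)

theorem letter_tail (c : Char)
    (h : (decide ('a' ≤ c ∧ c ≤ 'z') || decide ('A' ≤ c ∧ c ≤ 'Z')) = true) :
    schemeTailB c = true := by
  simp only [schemeTailB, Bool.or_eq_true] at *
  tauto

theorem dropWhile_cons_head (p : Char → Bool) (l : List Char) (dh : Char) (post : List Char)
    (h : l.dropWhile p = dh :: post) : p dh = false := by
  induction l with
  | nil => simp at h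
  | cons a l ih =>
    by_cases hp : p a = true
    · rw [List.dropWhile_cons, if_pos hp] at h; exact ih h
    · rw [List.dropWhile_cons, if_neg hp] at h
      cases h; simpa using hp

-- closed form of B's scan
def scanSpec (rest buf : List Char) : Option (List Char) :=
  if (rest.dropWhile schemeTailB).head? = some ':' then
    some (buf ++ rest.takeWhile schemeTailB)
  else none

theorem scanB_eq (rest : List Char) : ∀ buf, scanB rest buf = scanSpec rest buf := by
  induction rest with
  | nil => intro buf; simp [scanB, scanSpec]
  | cons ch rest ih =>
    intro buf
    by_cases hc : ch = ':'
    · subst hc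
      simp [scanB, scanSpec, schemeTailB]
    · by_cases ht : schemeTailB ch = true
      · have hne : (ch == ':') = false := by simp [hc]
        simp [scanB, hne, ht, ih, scanSpec]
      · have hne : (ch == ':') = false := by simp [hc]
        simp only [Bool.not_eq_true] at ht
        simp [scanB, hne, ht, scanSpec, hc]

-- list-level mirrors of the two ports (same primitives; only the String wrappers peeled off)
def validList (scheme : List Char) : Bool :=
  match PySem.List.pyGet? scheme 0 with
  | none => false
  | some first =>
    if !(decide ('a' ≤ first ∧ first ≤ 'z') || decide ('A' ≤ first ∧ first ≤ 'Z')) then false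
    else (PySem.List.slice scheme (some 1) none).all schemeTailB

def aList (cs : List Char) : Option String :=
  let idx := PySem.Chars.find cs [':']
  if idx ≤ 0 then none
  else
    let e0 : Int := cs.length
    let e1 := let j := PySem.Chars.find cs ['/']; if j ≠ -1 ∧ j < e0 then j else e0
    let e2 := let j := PySem.Chars.find cs ['?']; if j ≠ -1 ∧ j < e1 then j else e1
    let e3 := let j := PySem.Chars.find cs ['#']; if j ≠ -1 ∧ j < e2 then j else e2
    if idx ≥ e3 then none
    else
      let scheme := PySem.List.slice cs none (some idx)
      if validList scheme then some (String.ofList (PySem.Chars.lower scheme)) else none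

def bList (cs : List Char) : Option String :=
  match cs with
  | [] => none
  | c0 :: rest =>
    if decide ('a' ≤ c0 ∧ c0 ≤ 'z') || decide ('A' ≤ c0 ∧ c0 ≤ 'Z') then
      match scanB rest [c0] with
      | some buf => some (PySem.Str.lower (String.ofList buf))
      | none => none
    else none

theorem A_bridge (value : String) : get_scheme_py value = aList value.toList := by
  unfold get_scheme_py aList is_valid_scheme_py validList
  simp only [PySem.Str.find, PySem.Str.len, PySem.Str.slice, PySem.Str.pyGet?,
    PySem.Str.lower, String.toList_ofList, PySem.Chars.pyGet?_eq_listPyGet?,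
    PySem.Chars.slice_eq_listSlice]
  rfl

theorem B_bridge (value : String) : get_scheme_py_alt value = bList value.toList := rfl

theorem main_list (cs : List Char) : aList cs = bList cs := by
  cases cs with
  | nil =>
    have h : PySem.Chars.find ([] : List Char) [':'] = -1 := rfl
    simp [aList, bList, h]
  | cons c0 rest =>
    by_cases hl : (decide ('a' ≤ c0 ∧ c0 ≤ 'z') || decide ('A' ≤ c0 ∧ c0 ≤ 'Z')) = true
    · by_cases hd : (rest.dropWhile schemeTailB).head? = some ':'
      · -- the scheme is valid and terminated by the first colon: both return it lowercased
        cases hdrop : rest.dropWhile schemeTailB with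
        | nil => rw [hdrop] at hd; simp at hd
        | cons dh post =>
          rw [hdrop] at hd
          simp only [List.head?_cons, Option.some.injEq] at hd
          subst hd
          have hrest : rest = rest.takeWhile schemeTailB ++ ':' :: post := by
            conv_lhs => rw [← List.takeWhile_append_dropWhile (p := schemeTailB) (l := rest)]
            rw [hdrop]
          set pre := rest.takeWhile schemeTailB with hpredef
          have hptail : ∀ c ∈ pre, schemeTailB c = true := fun c hc => List.mem_takeWhile_imp hc
          have hc0 : schemeTailB c0 = true := letter_tail c0 hl
          have htake1 : (c0 :: rest).take (pre.length + 1) = c0 :: pre := by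
            rw [hrest, List.take_succ_cons, List.take_left]
          have htake2 : (c0 :: rest).take (pre.length + 2) = c0 :: pre ++ [':'] := by
            rw [hrest]
            have : pre.length + 2 = (pre.length + 1) + 1 := by omega
            rw [this, List.take_succ_cons, List.take_append]
            simp
          have hcolpos : (c0 :: rest)[pre.length + 1]? = some ':' := by
            rw [hrest]
            rw [List.getElem?_cons_succ, List.getElem?_append_right (le_refl pre.length)]
            simp
          have hnocolon : ':' ∉ (c0 :: rest).take (pre.length + 1) := by
            rw [htake1]
            intro hmem
            rcases List.mem_cons.mp hmem with h | h
            · exact (tail_not_special c0 hc0).1 h.symm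
            · exact absurd (hptail _ h) (by decide)
          have hidx : PySem.Chars.find (c0 :: rest) [':'] = ((pre.length + 1 : Nat) : Int) :=
            find_at _ ':' (pre.length + 1) hnocolon hcolpos
          have hnosep : ∀ x : Char, x ≠ ':' → schemeTailB x = false →
              x ∉ (c0 :: rest).take (pre.length + 2) := by
            intro x hx hxs hmem
            rw [htake2] at hmem
            rcases List.mem_append.mp hmem with h | h
            · rcases List.mem_cons.mp h with h | h
              · rw [h] at hxs; rw [hc0] at hxs; exact absurd hxs (by decide)
              · rw [hptail _ h] at hxs; exact absurd hxs (by decide)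
            · exact hx (by simpa using h)
          have hs1 := find_lb (c0 :: rest) '/' (pre.length + 2) (hnosep '/' (by decide) (by decide))
          have hs2 := find_lb (c0 :: rest) '?' (pre.length + 2) (hnosep '?' (by decide) (by decide))
          have hs3 := find_lb (c0 :: rest) '#' (pre.length + 2) (hnosep '#' (by decide) (by decide))
          have hlen : (pre.length + 2 : Int) ≤ ((c0 :: rest).length : Int) := by
            rw [hrest]; simp; omega
          have hsl : PySem.List.slice (c0 :: rest) none (some ((pre.length + 1 : Nat) : Int)) =
              c0 :: pre := by
            rw [PySem.List.slice_to _ (by positivity), Int.toNat_natCast, htake1]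
          have hval : validList (c0 :: pre) = true := by
            have hdrop1 : PySem.List.slice (c0 :: pre) (some 1) none = pre :=
              PySem.List.slice_from _ (by norm_num)
            simp only [validList, PySem.List.pyGet?_ofNat', List.getElem?_cons_zero, hdrop1]
            rw [if_neg (by rw [hl]; decide)]
            simpa [List.all_eq_true] using hptail
          have hbs : bList (c0 :: rest) = some (String.ofList (PySem.Chars.lower (c0 :: pre))) := by
            simp only [bList]
            rw [if_pos hl, scanB_eq]
            simp [scanSpec, hdrop, PySem.Str.lower]
            rw [← hpredef]
          rw [hbs]
          simp only [aList, hidx, hsl, hval]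
          rw [if_neg (by push_cast; omega)]
          rw [if_neg ?hge]
          case hge =>
            push_cast
            push_cast at hs1 hs2 hs3 hlen
            split_ifs <;> omega
          simp
      · -- the scan hits end-of-string or an invalid character first: both return none
        have hb : bList (c0 :: rest) = none := by
          simp only [bList]
          rw [if_pos hl, scanB_eq]
          simp [scanSpec, hd]
        rw [hb]
        have hc0 : schemeTailB c0 = true := letter_tail c0 hl
        cases hdrop : rest.dropWhile schemeTailB with
        | nil =>
          have hrest : rest = rest.takeWhile schemeTailB := by
            conv_lhs => rw [← List.takeWhile_append_dropWhile (p := schemeTailB) (l := rest)]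
            rw [hdrop, List.append_nil]
          have hnc : ':' ∉ (c0 :: rest) := by
            intro hmem
            rcases List.mem_cons.mp hmem with h | h
            · rw [← h] at hc0; exact absurd hc0 (by decide)
            · rw [hrest] at h
              exact absurd (List.mem_takeWhile_imp h) (by decide)
          have hfind := find_none_of_not_mem (c0 :: rest) ':' hnc
          simp [aList, hfind]
        | cons dh post =>
          have hdh : schemeTailB dh = false := dropWhile_cons_head _ _ _ _ hdrop
          have hdhc : dh ≠ ':' := by
            rw [hdrop] at hd; simpa using hd
          have hrest : rest = rest.takeWhile schemeTailB ++ dh :: post := by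
            conv_lhs => rw [← List.takeWhile_append_dropWhile (p := schemeTailB) (l := rest)]
            rw [hdrop]
          set pre := rest.takeWhile schemeTailB with hpredef
          have hptail : ∀ c ∈ pre, schemeTailB c = true := fun c hc => List.mem_takeWhile_imp hc
          have htake2 : (c0 :: rest).take (pre.length + 2) = c0 :: pre ++ [dh] := by
            rw [hrest]
            have h2 : pre.length + 2 = (pre.length + 1) + 1 := by omega
            rw [h2, List.take_succ_cons, List.take_append]
            simp
          have hnocolon : ':' ∉ (c0 :: rest).take (pre.length + 2) := by
            rw [htake2]
            intro hmem
            rcases List.mem_append.mp hmem with h | h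
            · rcases List.mem_cons.mp h with h | h
              · rw [← h] at hc0; exact absurd hc0 (by decide)
              · exact absurd (hptail _ h) (by decide)
            · have h' : ':' = dh := by simpa using h
              exact hdhc h'.symm
          have hlb := find_lb (c0 :: rest) ':' (pre.length + 2) hnocolon
          by_cases h0 : PySem.Chars.find (c0 :: rest) [':'] ≤ 0
          · simp [aList, h0]
          · have hge : ((pre.length + 2 : Nat) : Int) ≤ PySem.Chars.find (c0 :: rest) [':'] := by
              rcases hlb with h | h
              · omega
              · exact h
            obtain ⟨m, hm, hmge⟩ : ∃ m, (PySem.Chars.find (c0 :: rest) [':']).toNat = m + 1 ∧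
                pre.length + 1 ≤ m := by
              refine ⟨(PySem.Chars.find (c0 :: rest) [':']).toNat - 1, by omega, by omega⟩
            have hsl : PySem.List.slice (c0 :: rest) none
                (some (PySem.Chars.find (c0 :: rest) [':'])) = c0 :: rest.take m := by
              have hnn : (0:Int) ≤ PySem.Chars.find (c0 :: rest) [':'] := by omega
              rw [PySem.List.slice_to _ hnn, hm, List.take_succ_cons]
            have hdh_mem : dh ∈ rest.take m := by
              have hg : rest[pre.length]? = some dh := by
                rw [hrest, List.getElem?_append_right (le_refl pre.length)]
                simp
              exact mem_take_of_getElem? rest pre.length m dh hg (by omega)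
            have hval : validList (c0 :: rest.take m) = false := by
              have hdrop1 : PySem.List.slice (c0 :: rest.take m) (some 1) none = rest.take m :=
                PySem.List.slice_from _ (by norm_num)
              simp only [validList, PySem.List.pyGet?_ofNat', List.getElem?_cons_zero, hdrop1]
              rw [if_neg (by rw [hl]; decide)]
              rw [List.all_eq_false]
              exact ⟨dh, hdh_mem, by simp [hdh]⟩
            simp [aList, h0, hsl, hval]
    · -- first character is not a letter: both return none
      have hl2 : ¬(('a' ≤ c0 ∧ c0 ≤ 'z') ∨ ('A' ≤ c0 ∧ c0 ≤ 'Z')) := by simpa using hl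
      have hb : bList (c0 :: rest) = none := by
        simp only [bList]; rw [if_neg hl]
      rw [hb]
      by_cases h0 : PySem.Chars.find (c0 :: rest) [':'] ≤ 0
      · simp [aList, h0]
      · have hnn : (0:Int) ≤ PySem.Chars.find (c0 :: rest) [':'] := by omega
        obtain ⟨m, hm⟩ : ∃ m, (PySem.Chars.find (c0 :: rest) [':']).toNat = m + 1 := by
          refine ⟨(PySem.Chars.find (c0 :: rest) [':']).toNat - 1, ?_⟩; omega
        have hsl : PySem.List.slice (c0 :: rest) none (some (PySem.Chars.find (c0 :: rest) [':'])) =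
            c0 :: rest.take m := by
          rw [PySem.List.slice_to _ hnn, hm, List.take_succ_cons]
        have hval : validList (c0 :: rest.take m) = false := by
          simp [validList, hl2]
        simp [aList, h0, hsl, hval]

theorem get_scheme_py_spec' (value : String) :
    get_scheme_py value = get_scheme_py_alt value := by
  rw [A_bridge, B_bridge]; exact main_list value.toList

-- ===== VERDICT (by name: the statement is the Claim_ definition above) =====
theorem get_scheme_py_spec : Claim_equal_get_scheme_py := by
  intro value _
  exact get_scheme_py_spec' value
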